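-- pv_equiv track=rewrite | github.com/zuoan7/BIORAG | scripts/ingestion/preprocess_and_chunk.py | _merge_broken_lines
-- ===== SOURCE A (Python) =====
-- def _merge_broken_lines(text: str) -> str:
--     """
--     合并 PDF 解析导致的断行。
--     规则：如果一行以非句末标点结尾，且下一行以小写字母开头，则合并。
--     """
--     lines = text.split("\n")
--     if not lines:
--         return text
--
--     merged = [lines[0]]
--     for line in lines[1:]:
--         prev = merged[-1]
--         if (
--             prev
--             and not prev.endswith((".", "!", "?", ":", ";", ")", "]", "}", "—", "–"))
--             and line
--             and line[0].islower()
--         ):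
--             merged[-1] = prev + " " + line
--         else:
--             merged.append(line)
--
--     return "\n".join(merged)
-- ===== SOURCE B (Python) =====
-- def _merge_broken_lines(text: str) -> str:
--     """Two-pass re-implementation: decide each line boundary locally, then join once."""
--     lines = text.split("\n")
--     end_punct = (".", "!", "?", ":", ";", ")", "]", "}", "—", "–")
--     # Pass 1: one separator per boundary, decided purely from the adjacent lines.
--     seps = [
--         " " if a and not a.endswith(end_punct) and b and b[0].islower() else "\n"
--         for a, b in zip(lines, lines[1:])
--     ]
--     # Pass 2: interleave lines and separators, single join (no repeated concatenation).
--     parts = [lines[0]]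
--     for sep, line in zip(seps, lines[1:]):
--         parts.append(sep)
--         parts.append(line)
--     return "".join(parts)
-- ===== Notes on version B (the rewrite author's own statement) =====
-- stated objective: alternative
-- what changed: Replaces A's running accumulator that mutates merged[-1] with a two-pass shape: first compute one separator per line boundary from the adjacent original lines (the decision is purely local), then interleave lines and separators and join once.
import Mathlib
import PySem

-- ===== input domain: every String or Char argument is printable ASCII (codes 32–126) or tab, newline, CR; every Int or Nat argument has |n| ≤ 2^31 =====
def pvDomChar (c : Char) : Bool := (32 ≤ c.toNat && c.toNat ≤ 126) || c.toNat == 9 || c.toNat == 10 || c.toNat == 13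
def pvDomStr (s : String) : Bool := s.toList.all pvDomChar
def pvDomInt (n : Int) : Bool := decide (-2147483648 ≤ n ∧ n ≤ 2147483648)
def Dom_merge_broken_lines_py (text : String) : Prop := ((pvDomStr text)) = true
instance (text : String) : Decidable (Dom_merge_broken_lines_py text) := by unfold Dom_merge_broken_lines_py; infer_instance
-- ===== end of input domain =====

-- B replaces A's running accumulator (mutating merged[-1]) by a two-pass shape: compute one
-- separator per line boundary locally, then interleave and join once (objective: alternative).

-- ===== PORT A =====

-- prev.endswith((".", "!", "?", ":", ";", ")", "]", "}", "—", "–")): tuple endswith = or of the members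
def pvEndsPunct (s : String) : Bool :=
  PySem.Str.endswith s "." || PySem.Str.endswith s "!" || PySem.Str.endswith s "?" ||
  PySem.Str.endswith s ":" || PySem.Str.endswith s ";" || PySem.Str.endswith s ")" ||
  PySem.Str.endswith s "]" || PySem.Str.endswith s "}" || PySem.Str.endswith s "—" ||
  PySem.Str.endswith s "–"

-- line[0].islower() (only evaluated when line is non-empty, so the none arm is unreachable)
def pvLowerFirst (s : String) : Bool :=
  match PySem.Str.pyGet? s 0 with
  | some c => PySem.Chars.islower c
  | none => false

-- the merge condition of A's if (identical text appears in B's comprehension)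
def pvCond (prev line : String) : Bool :=
  !(prev == "") && !pvEndsPunct prev && !(line == "") && pvLowerFirst line

-- one iteration of A's for-loop over `merged`
def pvStepA (merged : List String) (line : String) : List String :=
  let prev := merged.getLastD ""           -- merged[-1]; merged is never empty
  if pvCond prev line then merged.dropLast ++ [prev ++ " " ++ line]
  else merged ++ [line]

def merge_broken_lines_py (text : String) : String :=
  match PySem.Str.split? text "\n" with
  | none => text                            -- unreachable: the separator "\n" is non-empty
  | some lines =>
    match lines with
    | [] => text                            -- Python's `if not lines: return text` (unreachable: split never returns [])
    | l0 :: rest => PySem.Str.join "\n" (rest.foldl pvStepA [l0])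

-- ===== PORT B =====

-- the separator chosen for one boundary (Source B's comprehension body)
def pvSep (a b : String) : String := if pvCond a b then " " else "\n"

def merge_broken_lines_py_alt (text : String) : String :=
  match PySem.Str.split? text "\n" with
  | none => text                            -- unreachable: the separator "\n" is non-empty
  | some lines =>
    match lines with
    | [] => text                            -- unreachable: split never returns []
    | l0 :: rest =>
      let seps := List.zipWith pvSep (l0 :: rest) rest      -- zip(lines, lines[1:])
      PySem.Str.join "" (l0 :: (seps.zip rest).flatMap (fun p => [p.1, p.2]))

-- ===== PRECONDITION & SPEC =====
def Spec_merge_broken_lines_py (text : String) (out : String) : Prop := out = merge_broken_lines_py_alt text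
instance (text : String) (out : String) : Decidable (Spec_merge_broken_lines_py text out) := by unfold Spec_merge_broken_lines_py; infer_instance

-- ===== CLAIM (what is proved, stated in full; the proofs are below) =====
def Claim_equal_merge_broken_lines_py : Prop := ∀ (text : String), Dom_merge_broken_lines_py text → Spec_merge_broken_lines_py text (merge_broken_lines_py text)

-- ===== LEMMAS AND PROOFS =====

-- A's loop, written as structural recursion on the remaining lines with the current last line
def pvFA (cur : String) : List String → List String
  | [] => [cur]
  | l :: rest => if pvCond cur l then pvFA (cur ++ " " ++ l) rest else cur :: pvFA l rest

theorem pvFA_ne_nil (cur : String) (rest : List String) : pvFA cur rest ≠ [] := by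
  induction rest generalizing cur with
  | nil => simp [pvFA]
  | cons l rest ih => simp only [pvFA]; split <;> simp [ih]

theorem pvFoldl_eq_pvFA (rest acc : List String) (cur : String) :
    List.foldl pvStepA (acc ++ [cur]) rest = acc ++ pvFA cur rest := by
  induction rest generalizing acc cur with
  | nil => simp [pvFA]
  | cons l rest ih =>
    simp only [List.foldl_cons, pvFA]
    have hstep : pvStepA (acc ++ [cur]) l =
        if pvCond cur l then acc ++ [cur ++ " " ++ l] else (acc ++ [cur]) ++ [l] := by
      simp [pvStepA]
    rw [hstep]
    by_cases h : pvCond cur l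
    · simp only [h, if_pos]; rw [ih]
    · simp only [h, if_false, Bool.false_eq_true]
      rw [ih (acc ++ [cur]) l]; simp

-- endswith with a one-character pattern only looks at the last character
theorem pvSingleton_suffix (c : Char) (l : List Char) : [c] <:+ l ↔ l.getLast? = some c := by
  constructor
  · rintro ⟨t, rfl⟩; simp
  · intro h
    obtain ⟨ys, rfl⟩ := List.getLast?_eq_some_iff.1 h
    exact ⟨ys, rfl⟩

theorem pvEnds_char (s p : String) (c : Char) (hp : p.toList = [c]) :
    PySem.Str.endswith s p = (s.toList.getLast? == some c) := by
  rw [Bool.eq_iff_iff, beq_iff_eq, PySem.Str.endswith_eq, PySem.Chars.endswith_iff, hp]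
  exact pvSingleton_suffix c s.toList

theorem pvEndsPunct_congr (a a' : String) (h : a.toList.getLast? = a'.toList.getLast?) :
    pvEndsPunct a = pvEndsPunct a' := by
  simp only [pvEndsPunct,
    pvEnds_char _ "." '.' rfl, pvEnds_char _ "!" '!' rfl, pvEnds_char _ "?" '?' rfl,
    pvEnds_char _ ":" ':' rfl, pvEnds_char _ ";" ';' rfl, pvEnds_char _ ")" ')' rfl,
    pvEnds_char _ "]" ']' rfl, pvEnds_char _ "}" '}' rfl, pvEnds_char _ "—" '—' rfl,
    pvEnds_char _ "–" '–' rfl, h]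

theorem pvCond_congr (a a' l : String) (he : (a = "") ↔ (a' = ""))
    (h : a.toList.getLast? = a'.toList.getLast?) : pvCond a l = pvCond a' l := by
  have e1 : (a == "") = (a' == "") := by
    rw [Bool.eq_iff_iff, beq_iff_eq, beq_iff_eq]; exact he
  simp only [pvCond, e1, pvEndsPunct_congr a a' h]

-- "".join of a cons
theorem pvJoinEmptyCons (x : String) (xs : List String) :
    PySem.Str.join "" (x :: xs) = x ++ PySem.Str.join "" xs := by
  rw [← String.toList_inj]
  cases xs with
  | nil => simp [PySem.Str.toList_join, PySem.Chars.join, List.intercalate]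
  | cons y t =>
    simp [PySem.Str.toList_join, PySem.Chars.join_cons_cons]

-- "\n".join of a cons with a non-empty tail
theorem pvJoinNlCons (x : String) (xs : List String) (h : xs ≠ []) :
    PySem.Str.join "\n" (x :: xs) = x ++ "\n" ++ PySem.Str.join "\n" xs := by
  rw [← String.toList_inj]
  cases xs with
  | nil => exact absurd rfl h
  | cons y t =>
    simp [PySem.Str.toList_join, PySem.Chars.join_cons_cons]

-- B's assembled tail after the first line, as a function of the previous ORIGINAL line
def pvTail (prev : String) (rest : List String) : String :=
  PySem.Str.join "" (((List.zipWith pvSep (prev :: rest) rest).zip rest).flatMap (fun p => [p.1, p.2]))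

theorem pvTail_nil (prev : String) : pvTail prev [] = "" := by
  rw [pvTail, ← String.toList_inj]
  simp [PySem.Str.toList_join, PySem.Chars.join, List.intercalate]

theorem pvTail_cons (prev l : String) (rest : List String) :
    pvTail prev (l :: rest) = pvSep prev l ++ (l ++ pvTail l rest) := by
  simp only [pvTail, List.zipWith_cons_cons, List.zip_cons_cons, List.flatMap_cons]
  rw [show (([pvSep prev l, l] : List String) ++
      ((List.zipWith pvSep (l :: rest) rest).zip rest).flatMap (fun p => [p.1, p.2])) =
      pvSep prev l :: l :: ((List.zipWith pvSep (l :: rest) rest).zip rest).flatMap (fun p => [p.1, p.2]) from rfl]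
  rw [pvJoinEmptyCons, pvJoinEmptyCons]

theorem pvMain (rest : List String) (cur prev : String)
    (he : (cur = "") ↔ (prev = "")) (hl : cur.toList.getLast? = prev.toList.getLast?) :
    PySem.Str.join "\n" (pvFA cur rest) = cur ++ pvTail prev rest := by
  induction rest generalizing cur prev with
  | nil =>
    rw [pvTail_nil, ← String.toList_inj]
    simp [pvFA, PySem.Str.toList_join, PySem.Chars.join, List.intercalate]
  | cons l rest ih =>
    rw [pvTail_cons]
    have hc : pvCond cur l = pvCond prev l := pvCond_congr cur prev l he hl
    simp only [pvFA]
    by_cases h : pvCond cur l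
    · -- merge: the new accumulated line has the same emptiness/last character as l
      have hp : pvSep prev l = " " := by simp [pvSep, ← hc, h]
      have hcl : pvCond cur l = true := h
      simp only [pvCond, Bool.and_eq_true, Bool.not_eq_eq_eq_not, Bool.not_true,
        beq_eq_false_iff_ne, ne_eq] at hcl
      have hlne : l ≠ "" := hcl.1.2
      have hlne' : l.toList ≠ [] := fun hx => hlne (String.toList_eq_nil_iff.1 hx)
      have he' : (cur ++ " " ++ l = "") ↔ (l = "") := by
        constructor
        · intro hx
          have := congrArg String.toList hx
          simp at this
        · intro hx; exact absurd hx hlne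
      have hl' : (cur ++ " " ++ l).toList.getLast? = l.toList.getLast? := by
        obtain ⟨c, hc2⟩ := Option.isSome_iff_exists.1 ((List.getLast?_isSome).2 hlne')
        have h3 : (cur ++ " " ++ l).toList = (cur.toList ++ [' ']) ++ l.toList := by
          simp [List.append_assoc]
        rw [h3, List.getLast?_append, hc2]; rfl
      rw [if_pos h, ih (cur ++ " " ++ l) l he' hl', hp]
      rw [← String.toList_inj]; simp
    · have hp : pvSep prev l = "\n" := by simp [pvSep, ← hc, h]
      rw [if_neg h, pvJoinNlCons _ _ (pvFA_ne_nil l rest), ih l l Iff.rfl rfl, hp]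
      rw [← String.toList_inj]; simp

-- ===== VERDICT (by name: the statement is the Claim_ definition above) =====
theorem merge_broken_lines_py_spec : Claim_equal_merge_broken_lines_py := by
  intro text _
  unfold Spec_merge_broken_lines_py merge_broken_lines_py merge_broken_lines_py_alt
  cases hs : PySem.Str.split? text "\n" with
  | none => rfl
  | some lines =>
    cases lines with
    | nil => rfl
    | cons l0 rest =>
      simp only
      rw [show ([l0] : List String) = [] ++ [l0] from rfl, pvFoldl_eq_pvFA, List.nil_append,
        pvMain rest l0 l0 Iff.rfl rfl, pvJoinEmptyCons, pvTail]
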